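-- pv_equiv track=rewrite | github.com/kirillkiselev-slim/sarafan_task | first_task.py | count_n_seq
-- ===== SOURCE A (Python) =====
-- def count_n_seq(length):
--     st = ''
--     for i in range(1, length + 1):
--         str_i = str(i) * i
--         remaining_length = length - len(st)
--         if len(str_i) > remaining_length:
--             st += str_i[:remaining_length]
--             break
--         st += str_i
--     return st
-- ===== SOURCE B (Python) =====
-- def count_n_seq(length):
--     # phase 1: purely numeric search for m, the number of blocks needed,
--     # using an arithmetic digit count (no strings built while scanning)
--     m, total = 0, 0
--     while total < length:
--         m += 1
--         d, n = 1, m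
--         while n >= 10:
--             n //= 10
--             d += 1
--         total += m * d
--     # phase 2: unconditionally render blocks 1..m, one final slice
--     return ''.join(str(i) * i for i in range(1, m + 1))[:length]
-- ===== Notes on version B (the rewrite author's own statement) =====
-- stated objective: alternative
-- what changed: B first runs a purely numeric pass that finds the stopping block index m by accumulating i*digitcount(i) with an arithmetic digit counter (no strings built, no slicing), then renders all blocks 1..m unconditionally and applies a single final slice, whereas A builds the string incrementally with a per-iteration remaining-length comparison, partial slice and break.
import Mathlib
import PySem

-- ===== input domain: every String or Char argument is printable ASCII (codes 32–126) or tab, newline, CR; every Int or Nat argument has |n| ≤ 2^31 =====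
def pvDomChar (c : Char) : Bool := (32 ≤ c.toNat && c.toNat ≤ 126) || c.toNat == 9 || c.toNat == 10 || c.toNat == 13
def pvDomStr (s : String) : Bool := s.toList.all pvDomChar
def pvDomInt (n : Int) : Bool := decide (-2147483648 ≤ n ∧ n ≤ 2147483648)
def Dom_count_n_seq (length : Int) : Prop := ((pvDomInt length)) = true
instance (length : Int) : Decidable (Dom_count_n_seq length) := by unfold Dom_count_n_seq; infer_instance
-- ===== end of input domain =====

-- B splits the work into a purely numeric search for the stopping block index m
-- (arithmetic digit counting, no strings) followed by an unconditional render of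
-- blocks 1..m and one final slice; A builds the string incrementally with an
-- in-loop remaining-length check, partial slice and break.

-- ===== PORT A =====
-- the for-loop with its break, as structural recursion over range(1, length+1)
def count_n_seq_loop (length : Int) : List Int → List Char → List Char
  | [], st => st
  | i :: rest, st =>
    let str_i := PySem.List.pyRepeat (PySem.Int.toChars i) i
    let remaining := length - (st.length : Int)
    if (str_i.length : Int) > remaining then
      st ++ PySem.List.slice str_i none (some remaining)
    else
      count_n_seq_loop length rest (st ++ str_i)

def count_n_seq (length : Int) : String :=
  String.mk (count_n_seq_loop length (PySem.List.pyRange 1 (length + 1)) [])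

-- ===== PORT B =====
-- inner `while n >= 10: n //= 10; d += 1` of Source B (arithmetic digit counter)
def pvDigits (d n : Int) : Int :=
  if h : 10 ≤ n then pvDigits (d + 1) (PySem.Int.floordiv n 10) else d
  termination_by n.toNat
  decreasing_by
    have h1 : PySem.Int.floordiv n 10 = n / 10 := Int.fdiv_eq_ediv_of_nonneg n (by omega)
    rw [h1]; omega

-- outer `while total < length: m += 1; …; total += m*d` of Source B; fuel = length.toNat
-- bounds its iterations (each step raises total by at least 1)
def pvFindM (length : Int) : Nat → Int → Int → Int
  | 0, m, _ => m
  | fuel + 1, m, total =>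
    if total < length then
      pvFindM length fuel (m + 1) (total + (m + 1) * pvDigits 1 (m + 1))
    else m

def count_n_seq_alt (length : Int) : String :=
  String.mk (PySem.List.slice
    (PySem.Chars.join [] ((PySem.List.pyRange 1 (pvFindM length length.toNat 0 0 + 1)).map
      (fun i => PySem.List.pyRepeat (PySem.Int.toChars i) i))) none (some length))

-- ===== PRECONDITION & SPEC =====
def Spec_count_n_seq (length : Int) (out : String) : Prop := out = count_n_seq_alt length
instance (length : Int) (out : String) : Decidable (Spec_count_n_seq length out) := by unfold Spec_count_n_seq; infer_instance

-- ===== CLAIM (what is proved, stated in full; the proofs are below) =====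
def Claim_equal_count_n_seq : Prop := ∀ (length : Int), Dom_count_n_seq length → Spec_count_n_seq length (count_n_seq length)

-- ===== LEMMAS AND PROOFS =====

-- str(i)*i as a character block, and its length facts
def pvBlk (i : Int) : List Char := PySem.List.pyRepeat (PySem.Int.toChars i) i

theorem pvToDigitsCore_len_mono (b n fuel : Nat) (acc : List Char) :
    acc.length ≤ (Nat.toDigitsCore b fuel n acc).length := by
  induction fuel generalizing n acc with
  | zero => simp [Nat.toDigitsCore]
  | succ f ih =>
    simp only [Nat.toDigitsCore]
    split
    · simp
    · exact le_trans (by simp) (ih _ _)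

theorem pvToDigitsCore_len_succ (b n f : Nat) (acc : List Char) :
    acc.length + 1 ≤ (Nat.toDigitsCore b (f + 1) n acc).length := by
  simp only [Nat.toDigitsCore]
  split
  · simp
  · exact le_trans (by simp) (pvToDigitsCore_len_mono b _ f _)

theorem pvToDigits_ne_nil (n : Nat) : Nat.toDigits 10 n ≠ [] := by
  have := pvToDigitsCore_len_succ 10 n n []
  simp only [Nat.toDigits]
  intro h
  rw [h] at this
  simp at this

theorem pvToChars_ne_nil (i : Int) : PySem.Int.toChars i ≠ [] := by
  unfold PySem.Int.toChars
  split
  · simp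
  · exact pvToDigits_ne_nil _

-- toDigitsCore peels its accumulator
theorem pvToDigitsCore_acc (b : Nat) (f : Nat) :
    ∀ (n : Nat) (acc : List Char),
      Nat.toDigitsCore b f n acc = Nat.toDigitsCore b f n [] ++ acc := by
  induction f with
  | zero => intro n acc; simp [Nat.toDigitsCore]
  | succ f ih =>
    intro n acc
    simp only [Nat.toDigitsCore]
    split
    · simp
    · rw [ih (n / b) ((n % b).digitChar :: acc), ih (n / b) [(n % b).digitChar]]
      simp

-- fuel irrelevance once the fuel exceeds the number
theorem pvToDigitsCore_fuel (b : Nat) (hb : 2 ≤ b) :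
    ∀ (f f' n : Nat) (acc : List Char), n < f → n < f' →
      Nat.toDigitsCore b f n acc = Nat.toDigitsCore b f' n acc := by
  intro f
  induction f with
  | zero => intro f' n acc h; omega
  | succ f ih =>
    intro f' n acc h h'
    obtain ⟨f'', rfl⟩ : ∃ k, f' = k + 1 := ⟨f' - 1, by omega⟩
    simp only [Nat.toDigitsCore]
    split
    · rfl
    · rename_i hne
      have hn : 0 < n := by
        by_contra hz
        have hz0 : n = 0 := by omega
        subst hz0
        simp at hne
      have hdiv : n / b < n := Nat.div_lt_self hn (by omega)
      exact ih f'' (n / b) _ (lt_of_lt_of_le hdiv (Nat.le_of_lt_succ h)) (lt_of_lt_of_le hdiv (Nat.le_of_lt_succ h'))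

theorem pvToDigitsCore_succ (b f n : Nat) (acc : List Char) :
    Nat.toDigitsCore b (f + 1) n acc
      = if n / b = 0 then (n % b).digitChar :: acc
        else Nat.toDigitsCore b f (n / b) ((n % b).digitChar :: acc) := by
  conv_lhs => rw [Nat.toDigitsCore]

theorem pvToDigits_len_step (n : Nat) (h : 10 ≤ n) :
    (Nat.toDigits 10 n).length = (Nat.toDigits 10 (n / 10)).length + 1 := by
  have hne : n / 10 ≠ 0 := by omega
  have hdiv : n / 10 < n := Nat.div_lt_self (by omega) (by omega)
  have e1 : Nat.toDigits 10 n
      = Nat.toDigitsCore 10 n (n / 10) [] ++ [(n % 10).digitChar] := by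
    simp only [Nat.toDigits]
    rw [pvToDigitsCore_succ, if_neg hne, pvToDigitsCore_acc]
  have e2 : Nat.toDigitsCore 10 n (n / 10) [] = Nat.toDigits 10 (n / 10) := by
    simp only [Nat.toDigits]
    exact pvToDigitsCore_fuel 10 (by omega) n (n / 10 + 1) (n / 10) [] (by omega) (by omega)
  rw [e1, e2]
  simp

theorem pvToDigits_len_small (n : Nat) (h : n < 10) :
    (Nat.toDigits 10 n).length = 1 := by
  simp only [Nat.toDigits, Nat.toDigitsCore]
  rw [if_pos (by omega)]
  rfl

-- the arithmetic digit counter agrees with the length of str(n)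
theorem pvDigits_eq_aux : ∀ (k : Nat) (n : Int), n.toNat = k → 1 ≤ n → ∀ d : Int,
    pvDigits d n = d + ((Nat.toDigits 10 n.toNat).length : Int) - 1 := by
  intro k
  induction k using Nat.strong_induction_on with
  | _ k ih =>
    intro n hk hn d
    rw [pvDigits]
    by_cases h10 : 10 ≤ n
    · rw [dif_pos h10]
      have hfd : PySem.Int.floordiv n 10 = n / 10 := Int.fdiv_eq_ediv_of_nonneg n (by omega)
      have hnn : (n / 10).toNat = n.toNat / 10 := by omega
      have hlt : n.toNat / 10 < k := by omega
      have h1 : 1 ≤ n / 10 := by omega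
      rw [hfd, ih (n.toNat / 10) hlt (n / 10) (by omega) h1 (d + 1)]
      rw [hnn, pvToDigits_len_step n.toNat (by omega)]
      push_cast
      ring
    · rw [dif_neg h10]
      rw [pvToDigits_len_small n.toNat (by omega)]
      simp
theorem pvDigits_eq (n : Int) (hn : 1 ≤ n) :
    pvDigits 1 n = ((PySem.Int.toChars n).length : Int) := by
  have := pvDigits_eq_aux n.toNat n rfl hn 1
  rw [this]
  unfold PySem.Int.toChars
  rw [if_neg (by omega)]
  have hne := pvToDigits_ne_nil n.toNat
  have : 1 ≤ (Nat.toDigits 10 n.toNat).length :=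
    Nat.one_le_iff_ne_zero.mpr (fun h => hne (List.length_eq_zero_iff.mp h))
  omega

theorem pvBlk_len (i : Int) : (pvBlk i).length = i.toNat * (PySem.Int.toChars i).length := by
  simp [pvBlk, PySem.List.pyRepeat, List.length_flatten]

theorem pvBlk_len_int (i : Int) (h : 1 ≤ i) :
    ((pvBlk i).length : Int) = i * pvDigits 1 i := by
  rw [pvBlk_len, pvDigits_eq i h]
  push_cast
  rw [Int.toNat_of_nonneg (by omega)]

theorem pvBlk_ge (i : Int) : i.toNat ≤ (pvBlk i).length := by
  have h1 : 1 ≤ (PySem.Int.toChars i).length :=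
    Nat.one_le_iff_ne_zero.mpr (fun h => pvToChars_ne_nil i (List.length_eq_zero_iff.mp h))
  calc i.toNat = i.toNat * 1 := by ring
    _ ≤ i.toNat * (PySem.Int.toChars i).length := Nat.mul_le_mul_left _ h1
    _ = (pvBlk i).length := (pvBlk_len i).symm

theorem pvBlk_pos (i : Int) (h : 1 ≤ i) : 1 ≤ (pvBlk i).length :=
  le_trans (by omega) (pvBlk_ge i)

theorem pvJoin_nil (parts : List (List Char)) : PySem.Chars.join [] parts = parts.flatten := by
  show List.intercalate [] parts = parts.flatten
  induction parts with
  | nil => rfl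
  | cons h t ih => cases t <;> simp_all [List.intercalate, List.intersperse]

-- proof-side: the naive whole-block accumulation loop, the bridge between the two ports
def pvAltLoop (length : Int) : Nat → Int → Int → List (List Char) → List (List Char)
  | 0, _, _, parts => parts
  | fuel + 1, i, total, parts =>
    if total < length then
      let block := pvBlk i
      pvAltLoop length fuel (i + 1) (total + (block.length : Int)) (parts ++ [block])
    else parts

-- the total length of the blocks for i = k .. length
def pvSB (length k : Int) : Nat :=
  ((PySem.List.pyRange k (length + 1)).map (fun i => (pvBlk i).length)).sum

theorem pvAlt_stop (length : Int) (fuel : Nat) (i total : Int) (parts : List (List Char))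
    (h : length ≤ total) : pvAltLoop length fuel i total parts = parts := by
  cases fuel <;> simp [pvAltLoop, not_lt.mpr h]

theorem pvFindM_ge (length : Int) :
    ∀ (fuel : Nat) (m total : Int), m ≤ pvFindM length fuel m total := by
  intro fuel
  induction fuel with
  | zero => intro m total; simp [pvFindM]
  | succ f ih =>
    intro m total
    simp only [pvFindM]
    split
    · exact le_trans (by omega) (ih (m + 1) _)
    · exact le_refl m

-- Source B's numeric pass followed by an unconditional render equals the naive
-- whole-block accumulation, block list by block list
theorem pvFindM_bridge (length : Int) :
    ∀ (fuel : Nat) (i total : Int) (parts : List (List Char)), 1 ≤ i →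
      (pvAltLoop length fuel i total parts).flatten
        = parts.flatten
          ++ ((PySem.List.pyRange i (pvFindM length fuel (i - 1) total + 1)).map pvBlk).flatten := by
  intro fuel
  induction fuel with
  | zero =>
    intro i total parts hi
    simp only [pvFindM]
    rw [show i - 1 + 1 = i by omega, PySem.List.pyRange_one_eq_nil (le_refl i)]
    simp [pvAltLoop]
  | succ f ih =>
    intro i total parts hi
    simp only [pvAltLoop, pvFindM]
    by_cases hlt : total < length
    · rw [if_pos hlt, if_pos hlt]
      rw [show i - 1 + 1 = i by omega]
      have hlen : total + ((pvBlk i).length : Int) = total + i * pvDigits 1 i := by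
        rw [pvBlk_len_int i hi]
      rw [ih (i + 1) (total + ((pvBlk i).length : Int)) (parts ++ [pvBlk i]) (by omega)]
      rw [show i + 1 - 1 = i by omega, hlen]
      have hM : i ≤ pvFindM length f i (total + i * pvDigits 1 i) := pvFindM_ge length f i _
      rw [PySem.List.pyRange_one_cons (show i < pvFindM length f i (total + i * pvDigits 1 i) + 1 by omega)]
      simp
    · rw [if_neg hlt, if_neg hlt]
      rw [PySem.List.pyRange_one_eq_nil (show i - 1 + 1 ≤ i by omega)]
      simp

theorem pvMain (length : Int) :
    ∀ rem : Nat, ∀ (k : Int) (st : List Char) (fuel : Nat) (parts : List (List Char)),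
    1 ≤ k → (st.length : Int) ≤ length →
    rem = (length - st.length).toNat →
    rem ≤ fuel →
    rem ≤ pvSB length k →
    parts.flatten = st →
    count_n_seq_loop length (PySem.List.pyRange k (length + 1)) st
      = List.take length.toNat (pvAltLoop length fuel k (st.length : Int) parts).flatten := by
  intro rem
  induction rem using Nat.strong_induction_on with
  | _ rem ih =>
    intro k st fuel parts hk hst hrem hfuel hsum hparts
    by_cases h0 : rem = 0
    · subst h0
      have hle : length ≤ (st.length : Int) := by omega
      rw [pvAlt_stop length fuel k _ parts hle, hparts]
      have htake : List.take length.toNat st = st :=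
        List.take_of_length_le (by omega)
      rw [htake]
      by_cases hkb : k < length + 1
      · rw [PySem.List.pyRange_one_cons hkb]
        simp only [count_n_seq_loop]
        rw [show PySem.List.pyRepeat (PySem.Int.toChars k) k = pvBlk k from rfl]
        have hb := pvBlk_pos k hk
        have hle2 : length ≤ (st.length : Int) := hle
        rw [if_pos (by omega)]
        rw [show length - (st.length : Int) = 0 by omega]
        rw [PySem.List.slice_to _ (le_refl 0)]
        simp
      · rw [PySem.List.pyRange_one_eq_nil (by omega)]
        rfl
    · have hrpos : 0 < rem := Nat.pos_of_ne_zero h0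
      have hstlt : (st.length : Int) < length := by omega
      have hremI : (rem : Int) = length - (st.length : Int) := by omega
      have hkb : k < length + 1 := by
        by_contra hge
        rw [pvSB, PySem.List.pyRange_one_eq_nil (by omega)] at hsum
        simp at hsum
        omega
      have hcons : PySem.List.pyRange k (length + 1)
          = k :: PySem.List.pyRange (k + 1) (length + 1) := PySem.List.pyRange_one_cons hkb
      obtain ⟨f, rfl⟩ : ∃ f, fuel = f + 1 := ⟨fuel - 1, by omega⟩
      have hsum' : rem ≤ (pvBlk k).length + pvSB length (k + 1) := by
        rw [pvSB, hcons] at hsum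
        simpa [pvSB] using hsum
      rw [hcons]
      simp only [count_n_seq_loop, pvAltLoop, if_pos hstlt]
      rw [show PySem.List.pyRepeat (PySem.Int.toChars k) k = pvBlk k from rfl]
      have hb := pvBlk_pos k hk
      by_cases hgt : ((pvBlk k).length : Int) > length - (st.length : Int)
      · rw [if_pos hgt]
        have hstop : length ≤ (st.length : Int) + ((pvBlk k).length : Int) := by omega
        rw [pvAlt_stop length f (k + 1) _ _ hstop]
        rw [List.flatten_append, hparts]
        simp only [List.flatten_cons, List.flatten_nil, List.append_nil]
        rw [PySem.List.slice_to _ (by omega)]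
        have hsplit : length.toNat = st.length + (length - (st.length : Int)).toNat := by omega
        rw [hsplit, List.take_append, List.take_of_length_le (le_add_right (le_refl st.length)),
          Nat.add_sub_cancel_left]
      · rw [if_neg hgt]
        have hlt : ((pvBlk k).length : Int) ≤ length - (st.length : Int) := by omega
        have key := ih (rem - (pvBlk k).length) (by omega) (k + 1) (st ++ pvBlk k) f
          (parts ++ [pvBlk k]) (by omega)
          (by simp only [List.length_append]; push_cast; omega)
          (by simp only [List.length_append]; push_cast; omega) (by omega)
          (by omega) (by simp [hparts])
        rw [List.length_append] at key
        push_cast at key ⊢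
        exact key

-- ===== VERDICT (by name: the statement is the Claim_ definition above) =====
theorem count_n_seq_spec : Claim_equal_count_n_seq := by
  unfold Claim_equal_count_n_seq Spec_count_n_seq
  intro length _
  unfold count_n_seq count_n_seq_alt
  have hmap : (PySem.List.pyRange 1 (pvFindM length length.toNat 0 0 + 1)).map
      (fun i => PySem.List.pyRepeat (PySem.Int.toChars i) i)
      = (PySem.List.pyRange 1 (pvFindM length length.toNat 0 0 + 1)).map pvBlk := rfl
  by_cases hl : length ≤ 0
  · have hfuel : length.toNat = 0 := by omega
    rw [PySem.List.pyRange_one_eq_nil (by omega), hfuel]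
    simp [count_n_seq_loop, pvFindM, PySem.List.pyRange_one_eq_nil, PySem.List.slice,
      PySem.Chars.join, List.intercalate]
  · have hl1 : 1 ≤ length := by omega
    have hmem : (pvBlk length).length
        ∈ (PySem.List.pyRange 1 (length + 1)).map (fun i => (pvBlk i).length) :=
      List.mem_map_of_mem (PySem.List.mem_pyRange_one.mpr ⟨hl1, by omega⟩)
    have hsum : length.toNat ≤ pvSB length 1 :=
      le_trans (pvBlk_ge length) (List.single_le_sum (fun x _ => Nat.zero_le x) _ hmem)
    have main := pvMain length length.toNat 1 [] length.toNat []
      (le_refl 1) (by simp; omega) (by simp) (le_refl _) hsum rfl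
    simp only [List.length_nil, Nat.cast_zero] at main
    have bridge := pvFindM_bridge length length.toNat 1 0 [] (le_refl 1)
    simp only [List.flatten_nil, List.nil_append, show (1 : Int) - 1 = 0 from rfl] at bridge
    rw [hmap, pvJoin_nil, PySem.List.slice_to _ (by omega), ← bridge, ← main]
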